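-- pv_equiv track=rewrite | github.com/jhmfreitas/AI-Project | Project1/proj.py | non_movable_pegs
-- ===== SOURCE A (Python) =====
-- def c_peg():
--     return "O"
--
-- def c_empty():
--     return "_"
--
-- def is_empty(e):
--     return e == c_empty()
--
-- def is_peg(e):
--     return e == c_peg()
--
-- def line_number(board):
--     return len(board)
--
-- def column_number(board):
--     return len(board[0])
--
-- def non_movable_pegs(board):
--     count=0
--     lines = line_number(board)
--     columns = column_number(board)
--
--     for l in range(lines):
--         for c in range(columns):
--             if is_peg(board[l][c]):
--                 if 0<=c-2<columns and is_peg(board[l][c-1]) and is_empty(board[l][c-2]):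
--                     continue
--
--                 elif 0<=l-2<lines and is_peg(board[l-1][c]) and is_empty(board[l-2][c]):
--                     continue
--
--                 elif 0<=c+2<columns and is_peg(board[l][c+1]) and is_empty(board[l][c+2]):
--                     continue
--
--                 elif 0<=l+2<lines and is_peg(board[l+1][c]) and is_empty(board[l+2][c]):
--                     continue
--
--                 else:
--                     count+=1
--     return count
-- ===== SOURCE B (Python) =====
-- def non_movable_pegs(board):
--     columns = len(board[0])
--     grid = [row[:columns] for row in board]
--     pegs = sum(row.count("O") for row in grid)
--     jump_right = [(i, j) for i, line in enumerate(grid) for j in range(columns - 2)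
--                   if line[j] == "O" and line[j + 1] == "O" and line[j + 2] == "_"]
--     jump_left = [(i, j + 2) for i, line in enumerate(grid) for j in range(columns - 2)
--                  if line[j] == "_" and line[j + 1] == "O" and line[j + 2] == "O"]
--     cols = [[line[j] for line in grid] for j in range(columns)]
--     jump_down = [(i, j) for j, col in enumerate(cols) for i in range(len(grid) - 2)
--                  if col[i] == "O" and col[i + 1] == "O" and col[i + 2] == "_"]
--     jump_up = [(i + 2, j) for j, col in enumerate(cols) for i in range(len(grid) - 2)
--                if col[i] == "_" and col[i + 1] == "O" and col[i + 2] == "O"]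
--     return pegs - len(set(jump_right + jump_left + jump_down + jump_up))
-- ===== Notes on version B (the rewrite author's own statement) =====
-- stated objective: alternative
-- what changed: Instead of testing four jump directions per peg, B counts all pegs, scans every horizontal and vertical 3-cell window for the patterns OO_ / _OO to collect the coordinates of movable pegs into a set, and returns pegs minus the size of that set.
import Mathlib
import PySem

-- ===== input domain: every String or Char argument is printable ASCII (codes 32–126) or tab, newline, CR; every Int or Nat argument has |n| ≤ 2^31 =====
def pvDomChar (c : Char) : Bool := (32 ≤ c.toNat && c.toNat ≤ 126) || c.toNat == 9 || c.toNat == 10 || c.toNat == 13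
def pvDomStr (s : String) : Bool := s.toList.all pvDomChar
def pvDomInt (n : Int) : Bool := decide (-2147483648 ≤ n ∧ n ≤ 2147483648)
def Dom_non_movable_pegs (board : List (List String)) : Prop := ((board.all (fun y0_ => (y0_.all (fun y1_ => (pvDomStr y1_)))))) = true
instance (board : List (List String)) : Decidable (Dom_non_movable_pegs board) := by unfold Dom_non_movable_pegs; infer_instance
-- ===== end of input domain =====

-- B uses a different algorithm: count all pegs, collect the coordinates of movable pegs by
-- pattern-matching every horizontal/vertical 3-cell window (OO_ / _OO) into a set, and
-- return pegs − |set|; same asymptotic cost as A's per-peg four-direction test.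

-- ===== PORT A =====
def c_peg : String := "O"
def c_empty : String := "_"
def is_peg (e : String) : Bool := e == c_peg
def is_empty (e : String) : Bool := e == c_empty
def line_number (board : List (List String)) : Nat := board.length
def column_number (board : List (List String)) : Nat := (board.headD []).length
-- total stand-in for Python's board[l][c]; inside Pre_ every access A evaluates is in range
def cellA (board : List (List String)) (l c : Nat) : String := (board.getD l []).getD c ""

def non_movable_pegs (board : List (List String)) : Int :=
  let lines := line_number board
  let columns := column_number board
  (List.range lines).foldl (fun count l =>
    (List.range columns).foldl (fun count c =>
      if is_peg (cellA board l c) then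
        if 0 ≤ (c : Int) - 2 ∧ (c : Int) - 2 < (columns : Int) ∧
            is_peg (cellA board l (c - 1)) ∧ is_empty (cellA board l (c - 2)) then count
        else if 0 ≤ (l : Int) - 2 ∧ (l : Int) - 2 < (lines : Int) ∧
            is_peg (cellA board (l - 1) c) ∧ is_empty (cellA board (l - 2) c) then count
        else if 0 ≤ (c : Int) + 2 ∧ (c : Int) + 2 < (columns : Int) ∧
            is_peg (cellA board l (c + 1)) ∧ is_empty (cellA board l (c + 2)) then count
        else if 0 ≤ (l : Int) + 2 ∧ (l : Int) + 2 < (lines : Int) ∧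
            is_peg (cellA board (l + 1) c) ∧ is_empty (cellA board (l + 2) c) then count
        else count + 1
      else count) count) 0

-- ===== PORT B =====
-- line[j] / col[i] accesses are ported with getD "" — under Pre_ every access Source B makes is in range
def non_movable_pegs_alt (board : List (List String)) : Int :=
  let columns := (board.headD []).length
  let grid := board.map (fun row => row.take columns)   -- row[:columns], exact for a Nat stop
  let pegs := (grid.map (fun row => PySem.List.count row "O")).sum
  let jump_right := (PySem.List.enumerate grid).flatMap (fun p =>
      ((List.range (columns - 2)).filter (fun j =>
        (p.2.getD j "" == "O") && (p.2.getD (j+1) "" == "O") && (p.2.getD (j+2) "" == "_"))).map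
        (fun (j : Nat) => (p.1, (j : Int))))
  let jump_left := (PySem.List.enumerate grid).flatMap (fun p =>
      ((List.range (columns - 2)).filter (fun j =>
        (p.2.getD j "" == "_") && (p.2.getD (j+1) "" == "O") && (p.2.getD (j+2) "" == "O"))).map
        (fun (j : Nat) => (p.1, ((j+2 : Nat) : Int))))
  let cols := (List.range columns).map (fun j => grid.map (fun line => line.getD j ""))
  let jump_down := (PySem.List.enumerate cols).flatMap (fun q =>
      ((List.range (grid.length - 2)).filter (fun i =>
        (q.2.getD i "" == "O") && (q.2.getD (i+1) "" == "O") && (q.2.getD (i+2) "" == "_"))).map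
        (fun (i : Nat) => ((i : Int), q.1)))
  let jump_up := (PySem.List.enumerate cols).flatMap (fun q =>
      ((List.range (grid.length - 2)).filter (fun i =>
        (q.2.getD i "" == "_") && (q.2.getD (i+1) "" == "O") && (q.2.getD (i+2) "" == "O"))).map
        (fun (i : Nat) => (((i+2 : Nat) : Int), q.1)))
  (pegs : Int) -
    ((PySem.Set.ofList (jump_right ++ jump_left ++ jump_down ++ jump_up)).length : Int)

-- ===== PRECONDITION & SPEC =====
-- Pre_ excludes exactly the inputs on which Python A raises IndexError: the empty board
-- (len(board[0])) and ragged boards having some row shorter than row 0.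
def Pre_non_movable_pegs (board : List (List String)) : Prop :=
  board ≠ [] ∧ ∀ row ∈ board, (board.headD []).length ≤ row.length
instance (board : List (List String)) : Decidable (Pre_non_movable_pegs board) := by
  unfold Pre_non_movable_pegs; infer_instance

def pvWitness_non_movable_pegs : List (List String) :=
  [["O", "O", "_"], ["_", "O", "O"], ["O", "_", "_"]]

def Spec_non_movable_pegs (board : List (List String)) (out : Int) : Prop := out = non_movable_pegs_alt board
instance (board : List (List String)) (out : Int) : Decidable (Spec_non_movable_pegs board out) := by unfold Spec_non_movable_pegs; infer_instance

-- ===== CLAIM (what is proved, stated in full; the proofs are below) =====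
def Claim_equal_non_movable_pegs : Prop := ∀ (board : List (List String)), Dom_non_movable_pegs board → Pre_non_movable_pegs board → Spec_non_movable_pegs board (non_movable_pegs board)


-- ===== LEMMAS AND PROOFS =====

-- shorthands for the two board dimensions
def Lb (board : List (List String)) : Nat := board.length
def Cb (board : List (List String)) : Nat := (board.headD []).length

-- per-cell predicates (proof-side): peg at (l,c) and the four jump directions of A's chain
def pegP (board : List (List String)) (l c : Nat) : Bool := cellA board l c == "O"
def dirL (board : List (List String)) (c l j : Nat) : Bool :=
  decide (2 ≤ j) && (cellA board l (j-1) == "O") && (cellA board l (j-2) == "_")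
def dirU (board : List (List String)) (L l c : Nat) : Bool :=
  decide (2 ≤ l) && (cellA board (l-1) c == "O") && (cellA board (l-2) c == "_")
def dirR (board : List (List String)) (C l c : Nat) : Bool :=
  decide (c+2 < C) && (cellA board l (c+1) == "O") && (cellA board l (c+2) == "_")
def dirD (board : List (List String)) (L l c : Nat) : Bool :=
  decide (l+2 < L) && (cellA board (l+1) c == "O") && (cellA board (l+2) c == "_")
def movP (board : List (List String)) (L C l c : Nat) : Bool :=
  dirL board C l c || dirU board L l c || dirR board C l c || dirD board L l c

-- abstract shape of A's elif chain
lemma chain_eq (count : Int) (p q1 q2 q3 q4 : Prop)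
    [Decidable p] [Decidable q1] [Decidable q2] [Decidable q3] [Decidable q4] :
    (if p then
        if q1 then count else if q2 then count else if q3 then count
        else if q4 then count else count + 1
      else count)
    = count + (if p ∧ ¬q1 ∧ ¬q2 ∧ ¬q3 ∧ ¬q4 then 1 else 0) := by
  split_ifs <;> simp_all

-- the four direction tests, as the negations of A's elif guards (for in-range l, c)
lemma dirL_false (board : List (List String)) (l c : Nat) (hc : c < Cb board) :
    (dirL board (Cb board) l c = false) ↔
    ¬(0 ≤ (c : Int) - 2 ∧ (c : Int) - 2 < ((Cb board : Nat) : Int) ∧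
        cellA board l (c - 1) = "O" ∧ cellA board l (c - 2) = "_") := by
  have hc' : ((c : Int)) < ((Cb board : Nat) : Int) := by exact_mod_cast hc
  by_cases P : cellA board l (c-1) = "O" <;> by_cases Q : cellA board l (c-2) = "_" <;>
    simp only [dirL, P, Q, beq_eq_false_iff_ne, Bool.and_eq_false_iff,
      decide_eq_false_iff_not, not_and, not_lt, ne_eq,
      not_true_eq_false, not_false_eq_true, and_true, and_false, or_false, or_true,
      Bool.and_true, Bool.and_false, iff_true, iff_false] <;>
    try omega
  all_goals tauto

lemma dirU_false (board : List (List String)) (l c : Nat) (hl : l < Lb board) :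
    (dirU board (Lb board) l c = false) ↔
    ¬(0 ≤ (l : Int) - 2 ∧ (l : Int) - 2 < ((Lb board : Nat) : Int) ∧
        cellA board (l - 1) c = "O" ∧ cellA board (l - 2) c = "_") := by
  have hl' : ((l : Int)) < ((Lb board : Nat) : Int) := by exact_mod_cast hl
  by_cases P : cellA board (l-1) c = "O" <;> by_cases Q : cellA board (l-2) c = "_" <;>
    simp only [dirU, P, Q, beq_eq_false_iff_ne, Bool.and_eq_false_iff,
      decide_eq_false_iff_not, not_and, not_lt, ne_eq,
      not_true_eq_false, not_false_eq_true, and_true, and_false, or_false, or_true,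
      Bool.and_true, Bool.and_false, iff_true, iff_false] <;>
    try omega
  all_goals tauto

lemma dirR_false (board : List (List String)) (l c : Nat) :
    (dirR board (Cb board) l c = false) ↔
    ¬(0 ≤ (c : Int) + 2 ∧ (c : Int) + 2 < ((Cb board : Nat) : Int) ∧
        cellA board l (c + 1) = "O" ∧ cellA board l (c + 2) = "_") := by
  by_cases P : cellA board l (c+1) = "O" <;> by_cases Q : cellA board l (c+2) = "_" <;>
    simp only [dirR, P, Q, beq_eq_false_iff_ne, Bool.and_eq_false_iff,
      decide_eq_false_iff_not, not_and, not_lt, ne_eq,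
      not_true_eq_false, not_false_eq_true, and_true, and_false, or_false, or_true,
      Bool.and_true, Bool.and_false, iff_true, iff_false] <;>
    try omega
  all_goals tauto

lemma dirD_false (board : List (List String)) (l c : Nat) :
    (dirD board (Lb board) l c = false) ↔
    ¬(0 ≤ (l : Int) + 2 ∧ (l : Int) + 2 < ((Lb board : Nat) : Int) ∧
        cellA board (l + 1) c = "O" ∧ cellA board (l + 2) c = "_") := by
  by_cases P : cellA board (l+1) c = "O" <;> by_cases Q : cellA board (l+2) c = "_" <;>
    simp only [dirD, P, Q, beq_eq_false_iff_ne, Bool.and_eq_false_iff,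
      decide_eq_false_iff_not, not_and, not_lt, ne_eq,
      not_true_eq_false, not_false_eq_true, and_true, and_false, or_false, or_true,
      Bool.and_true, Bool.and_false, iff_true, iff_false] <;>
    try omega
  all_goals tauto

-- A's per-cell step adds 1 exactly when the cell is a non-movable peg
set_option maxHeartbeats 1600000 in
lemma stepA_eq (board : List (List String)) (l c : Nat) (count : Int)
    (hl : l < Lb board) (hc : c < Cb board) :
    (if is_peg (cellA board l c) then
        if 0 ≤ (c : Int) - 2 ∧ (c : Int) - 2 < ((Cb board : Nat) : Int) ∧
            is_peg (cellA board l (c - 1)) ∧ is_empty (cellA board l (c - 2)) then count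
        else if 0 ≤ (l : Int) - 2 ∧ (l : Int) - 2 < ((Lb board : Nat) : Int) ∧
            is_peg (cellA board (l - 1) c) ∧ is_empty (cellA board (l - 2) c) then count
        else if 0 ≤ (c : Int) + 2 ∧ (c : Int) + 2 < ((Cb board : Nat) : Int) ∧
            is_peg (cellA board l (c + 1)) ∧ is_empty (cellA board l (c + 2)) then count
        else if 0 ≤ (l : Int) + 2 ∧ (l : Int) + 2 < ((Lb board : Nat) : Int) ∧
            is_peg (cellA board (l + 1) c) ∧ is_empty (cellA board (l + 2) c) then count
        else count + 1
      else count)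
    = count + (if pegP board l c && !movP board (Lb board) (Cb board) l c then 1 else 0) := by
  rw [chain_eq]
  have hiff : (is_peg (cellA board l c) = true ∧
      ¬(0 ≤ (c : Int) - 2 ∧ (c : Int) - 2 < ((Cb board : Nat) : Int) ∧
          is_peg (cellA board l (c - 1)) = true ∧ is_empty (cellA board l (c - 2)) = true) ∧
      ¬(0 ≤ (l : Int) - 2 ∧ (l : Int) - 2 < ((Lb board : Nat) : Int) ∧
          is_peg (cellA board (l - 1) c) = true ∧ is_empty (cellA board (l - 2) c) = true) ∧
      ¬(0 ≤ (c : Int) + 2 ∧ (c : Int) + 2 < ((Cb board : Nat) : Int) ∧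
          is_peg (cellA board l (c + 1)) = true ∧ is_empty (cellA board l (c + 2)) = true) ∧
      ¬(0 ≤ (l : Int) + 2 ∧ (l : Int) + 2 < ((Lb board : Nat) : Int) ∧
          is_peg (cellA board (l + 1) c) = true ∧ is_empty (cellA board (l + 2) c) = true))
      ↔ ((pegP board l c && !movP board (Lb board) (Cb board) l c) = true) := by
    have dL := dirL_false board l c hc
    have dU := dirU_false board l c hl
    have dR := dirR_false board l c
    have dD := dirD_false board l c
    simp only [is_peg, is_empty, c_peg, c_empty, beq_iff_eq, pegP, movP,
      Bool.and_eq_true, Bool.not_eq_true', Bool.or_eq_false_iff]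
    rw [← dL, ← dU, ← dR, ← dD]
    tauto
  rw [if_congr hiff rfl rfl]

-- a 0/1 ite-sum is a filter length
lemma sum_ite_eq_filter_length (p : Nat → Bool) (xs : List Nat) :
    (xs.map (fun c => if p c then (1 : Int) else 0)).sum = ((xs.filter p).length : Int) := by
  induction xs with
  | nil => simp
  | cons x xs ih => by_cases h : p x <;> simp [h, ih, add_comm]

lemma inner_eq (board : List (List String)) (l : Nat) (hl : l < Lb board) (count : Int) :
    (List.range (Cb board)).foldl (fun count c =>
      if is_peg (cellA board l c) then
        if 0 ≤ (c : Int) - 2 ∧ (c : Int) - 2 < ((Cb board : Nat) : Int) ∧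
            is_peg (cellA board l (c - 1)) ∧ is_empty (cellA board l (c - 2)) then count
        else if 0 ≤ (l : Int) - 2 ∧ (l : Int) - 2 < ((Lb board : Nat) : Int) ∧
            is_peg (cellA board (l - 1) c) ∧ is_empty (cellA board (l - 2) c) then count
        else if 0 ≤ (c : Int) + 2 ∧ (c : Int) + 2 < ((Cb board : Nat) : Int) ∧
            is_peg (cellA board l (c + 1)) ∧ is_empty (cellA board l (c + 2)) then count
        else if 0 ≤ (l : Int) + 2 ∧ (l : Int) + 2 < ((Lb board : Nat) : Int) ∧
            is_peg (cellA board (l + 1) c) ∧ is_empty (cellA board (l + 2) c) then count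
        else count + 1
      else count) count
    = count + ((((List.range (Cb board)).filter (fun c =>
        pegP board l c && !movP board (Lb board) (Cb board) l c)).length : Nat) : Int) := by
  refine Eq.trans (PySem.List.foldl_congr_mem _ _
      (fun (acc : Int) (c : Nat) => acc +
        (if pegP board l c && !movP board (Lb board) (Cb board) l c then 1 else 0)) _
      (by intro acc c hcmem
          exact stepA_eq board l c acc hl (List.mem_range.mp hcmem))) ?_
  rw [PySem.List.foldl_add]
  rw [sum_ite_eq_filter_length]

-- A's count, as a sum of per-row filter lengths
lemma A_eq (board : List (List String)) :
    non_movable_pegs board =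
      ((((List.range (Lb board)).map (fun l =>
          ((List.range (Cb board)).filter (fun c =>
            pegP board l c && !movP board (Lb board) (Cb board) l c)).length)).sum : Nat) : Int) := by
  simp only [non_movable_pegs, line_number, column_number]
  refine Eq.trans (PySem.List.foldl_congr_mem _ _
      (fun (count : Int) (l : Nat) => count +
        ((((List.range (Cb board)).filter (fun c =>
          pegP board l c && !movP board (Lb board) (Cb board) l c)).length : Nat) : Int)) _
      (by intro count l hlmem
          exact inner_eq board l (List.mem_range.mp hlmem) count)) ?_
  rw [PySem.List.foldl_add]
  push_cast
  simp only [Lb]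
  simp [Function.comp_def]

-- list as a map over its index range
lemma rep_getD {a : Type} (xs : List a) (d : a) :
    (List.range xs.length).map (fun i => xs.getD i d) = xs := by
  apply List.ext_getElem (by simp)
  intro i h1 h2
  simp [List.getD_eq_getElem?_getD, List.getElem?_eq_getElem, h2]

lemma countP_eq_range (ys : List String) (d : String) (p : String → Bool) :
    ys.countP p = ((List.range ys.length).filter (fun i => p (ys.getD i d))).length := by
  conv_lhs => rw [← rep_getD ys d]
  rw [List.countP_map, List.countP_eq_length_filter]
  rfl

lemma sum_map_eq_range {a : Type} (xs : List a) (d : a) (g : a → Nat) :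
    (xs.map g).sum = ((List.range xs.length).map (fun i => g (xs.getD i d))).sum := by
  conv_lhs => rw [← rep_getD xs d]
  rw [List.map_map]
  rfl

-- splitting a filtered count by a second predicate
lemma filter_split (xs : List Nat) (p q : Nat → Bool) :
    (xs.filter p).length =
      (xs.filter (fun x => p x && q x)).length + (xs.filter (fun x => p x && !q x)).length := by
  induction xs with
  | nil => simp
  | cons x xs ih =>
    by_cases hp : p x <;> by_cases hq : q x <;> simp [hp, hq, ih] <;> omega

lemma getD_take (row : List String) (C c : Nat) (h : c < C) (d : String) :
    (row.take C).getD c d = row.getD c d := by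
  simp [List.getD_eq_getElem?_getD, h]

lemma cellA_eq (board : List (List String)) (l c : Nat) (hl : l < board.length) :
    cellA board l c = board[l].getD c "" := by
  simp [cellA, List.getD_eq_getElem?_getD, List.getElem?_eq_getElem, hl]

-- pegs = number of cells (l,c) with l < L, c < C holding "O"
lemma pegs_eq (board : List (List String))
    (hlen : ∀ row ∈ board, Cb board ≤ row.length) :
    ((board.map (fun row => row.take (Cb board))).map (fun row => PySem.List.count row "O")).sum =
      ((List.range (Lb board)).map (fun l =>
        ((List.range (Cb board)).filter (fun c => pegP board l c)).length)).sum := by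
  rw [List.map_map, sum_map_eq_range board [] _]
  refine congrArg List.sum (List.map_congr_left ?_)
  intro l hl
  rw [List.mem_range] at hl
  have hmem : board[l] ∈ board := List.getElem_mem hl
  have hC : Cb board ≤ board[l].length := hlen _ hmem
  have hgd : board.getD l [] = board[l] := by
    simp [List.getD_eq_getElem?_getD, hl]
  simp only [Function.comp_def, hgd, PySem.List.count_eq, List.count_eq_countP]
  rw [countP_eq_range _ ""]
  have hlength : (board[l].take (Cb board)).length = Cb board := by
    simp [List.length_take, Nat.min_eq_left hC]
  rw [hlength]
  refine congrArg List.length (List.filter_congr ?_)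
  intro c hc
  rw [List.mem_range] at hc
  rw [getD_take _ _ _ hc, pegP, cellA_eq board l c hl]

-- canonical list of movable-peg coordinates
def K (board : List (List String)) : List (Int × Int) :=
  (List.range (Lb board)).flatMap (fun l =>
    ((List.range (Cb board)).filter (fun c =>
      pegP board l c && movP board (Lb board) (Cb board) l c)).map
      (fun (c : Nat) => ((l : Int), (c : Int))))

lemma K_length (board : List (List String)) :
    (K board).length = ((List.range (Lb board)).map (fun l =>
      ((List.range (Cb board)).filter (fun c =>
        pegP board l c && movP board (Lb board) (Cb board) l c)).length)).sum := by
  rw [K, List.length_flatMap]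
  simp [Function.comp_def]

lemma K_nodup (board : List (List String)) : (K board).Nodup := by
  rw [K, List.nodup_flatMap]
  constructor
  · intro l _
    refine ((List.nodup_range).filter _).map ?_
    intro a b h
    have : (a : Int) = (b : Int) := congrArg Prod.snd h
    omega
  · apply List.Pairwise.imp ?_ (List.pairwise_lt_range)
    intro a b hab
    simp only [Function.onFun, List.disjoint_left]
    intro x hx hx'
    simp only [List.mem_map, List.mem_filter] at hx hx'
    obtain ⟨c1, _, rfl⟩ := hx
    obtain ⟨c2, _, he⟩ := hx'
    have : (b : Int) = (a : Int) := congrArg Prod.fst he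
    omega

lemma K_mem (board : List (List String)) (x : Int × Int) :
    x ∈ K board ↔ ∃ l c : Nat, l < Lb board ∧ c < Cb board ∧
      pegP board l c ∧ movP board (Lb board) (Cb board) l c ∧
      x = ((l : Int), (c : Int)) := by
  simp only [K, List.mem_flatMap, List.mem_map, List.mem_filter, List.mem_range,
    Bool.and_eq_true]
  constructor
  · rintro ⟨l, hl, c, ⟨hc, hpeg, hmov⟩, rfl⟩
    exact ⟨l, c, hl, hc, hpeg, hmov, rfl⟩
  · rintro ⟨l, c, hl, hc, hpeg, hmov, rfl⟩
    exact ⟨l, hl, c, ⟨hc, hpeg, hmov⟩, rfl⟩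

-- proof-side names for the four scans of port B (definitionally the port's let-bodies)
def gridT (board : List (List String)) : List (List String) :=
  board.map (fun row => row.take ((board.headD []).length))
def colsT (board : List (List String)) : List (List String) :=
  (List.range ((board.headD []).length)).map (fun j => (gridT board).map (fun line => line.getD j ""))
def jrT (board : List (List String)) : List (Int × Int) :=
  (PySem.List.enumerate (gridT board)).flatMap (fun p =>
    ((List.range ((board.headD []).length - 2)).filter (fun j =>
      (p.2.getD j "" == "O") && (p.2.getD (j+1) "" == "O") && (p.2.getD (j+2) "" == "_"))).map
      (fun (j : Nat) => (p.1, (j : Int))))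
def jlT (board : List (List String)) : List (Int × Int) :=
  (PySem.List.enumerate (gridT board)).flatMap (fun p =>
    ((List.range ((board.headD []).length - 2)).filter (fun j =>
      (p.2.getD j "" == "_") && (p.2.getD (j+1) "" == "O") && (p.2.getD (j+2) "" == "O"))).map
      (fun (j : Nat) => (p.1, ((j+2 : Nat) : Int))))
def jdT (board : List (List String)) : List (Int × Int) :=
  (PySem.List.enumerate (colsT board)).flatMap (fun q =>
    ((List.range ((gridT board).length - 2)).filter (fun i =>
      (q.2.getD i "" == "O") && (q.2.getD (i+1) "" == "O") && (q.2.getD (i+2) "" == "_"))).map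
      (fun (i : Nat) => ((i : Int), q.1)))
def juT (board : List (List String)) : List (Int × Int) :=
  (PySem.List.enumerate (colsT board)).flatMap (fun q =>
    ((List.range ((gridT board).length - 2)).filter (fun i =>
      (q.2.getD i "" == "_") && (q.2.getD (i+1) "" == "O") && (q.2.getD (i+2) "" == "O"))).map
      (fun (i : Nat) => (((i+2 : Nat) : Int), q.1)))

-- B's result, in terms of the named scans (definitional)
lemma alt_eq (board : List (List String)) :
    non_movable_pegs_alt board =
      (((board.map (fun row => row.take (Cb board))).map
          (fun row => PySem.List.count row "O")).sum : Int) -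
        ((PySem.Set.ofList (jrT board ++ jlT board ++ jdT board ++ juT board)).length : Int) := rfl

lemma gridT_length (board : List (List String)) : (gridT board).length = Lb board := by
  simp [gridT, Lb]

lemma gridT_getD (board : List (List String)) (l c : Nat)
    (hlen : ∀ row ∈ board, Cb board ≤ row.length)
    (hl : l < Lb board) (hc : c < Cb board) (hg : l < (gridT board).length) :
    ((gridT board)[l]'hg).getD c "" = cellA board l c := by
  have h1 : (gridT board)[l]'hg = board[l].take (Cb board) := by
    simp only [gridT, List.getElem_map]; rfl
  rw [h1, getD_take _ _ _ hc, cellA_eq board l c hl]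

lemma colsT_getD (board : List (List String)) (l c : Nat)
    (hlen : ∀ row ∈ board, Cb board ≤ row.length)
    (hl : l < Lb board) (hc : c < Cb board) (hcj : c < (colsT board).length) :
    ((colsT board)[c]'hcj).getD l "" = cellA board l c := by
  have : (colsT board)[c]'hcj = (gridT board).map (fun line => line.getD c "") := by
    simp only [colsT]
    rw [List.getElem_map]
    rw [List.getElem_range]
  rw [this]
  have hlg : l < (gridT board).length := by rw [gridT_length]; exact hl
  have : ((gridT board).map (fun line => line.getD c "")).getD l "" =
      ((gridT board)[l]'hlg).getD c "" := by
    simp [List.getD_eq_getElem?_getD, hlg]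
  rw [this, gridT_getD board l c hlen hl hc hlg]

lemma colsT_length (board : List (List String)) : (colsT board).length = Cb board := by
  simp [colsT, Cb]

lemma mem_jrT (board : List (List String))
    (hlen : ∀ row ∈ board, Cb board ≤ row.length) (x : Int × Int) :
    x ∈ jrT board ↔ ∃ l c : Nat, l < Lb board ∧ c < Cb board ∧
      pegP board l c ∧ dirR board (Cb board) l c ∧ x = ((l : Int), (c : Int)) := by
  simp only [jrT, List.mem_flatMap, PySem.List.mem_enumerate_iff, List.mem_map,
    List.mem_filter, List.mem_range, Bool.and_eq_true, beq_iff_eq]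
  constructor
  · rintro ⟨p, ⟨k, hk, rfl⟩, j, ⟨hj, ⟨h0, h1⟩, h2⟩, rfl⟩
    dsimp only at h0 h1 h2
    rw [show (board.headD []).length = Cb board from rfl] at hj
    have hkL : k < Lb board := by rwa [gridT_length] at hk
    have hjC : j < Cb board := by omega
    rw [gridT_getD board k j hlen hkL hjC hk] at h0
    rw [gridT_getD board k (j+1) hlen hkL (by omega) hk] at h1
    rw [gridT_getD board k (j+2) hlen hkL (by omega) hk] at h2
    refine ⟨k, j, hkL, hjC, ?_, ?_, by simp⟩
    · simp only [pegP, beq_iff_eq]; exact h0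
    · simp only [dirR, Bool.and_eq_true, beq_iff_eq, decide_eq_true_eq]
      exact ⟨⟨by omega, h1⟩, h2⟩
  · rintro ⟨l, c, hl, hc, hpeg, hdir, rfl⟩
    simp only [dirR, Bool.and_eq_true, beq_iff_eq, decide_eq_true_eq] at hdir
    obtain ⟨⟨hb, h1⟩, h2⟩ := hdir
    have hg : l < (gridT board).length := by rw [gridT_length]; exact hl
    refine ⟨(0 + (l : Int), (gridT board)[l]'hg), ⟨l, hg, rfl⟩, c,
      ⟨by rw [show (board.headD []).length = Cb board from rfl]; omega, ⟨?_, ?_⟩, ?_⟩, by simp⟩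
    · dsimp only; rw [gridT_getD board l c hlen hl hc hg]
      simpa [pegP] using hpeg
    · dsimp only; rw [gridT_getD board l (c+1) hlen hl (by omega) hg]; exact h1
    · dsimp only; rw [gridT_getD board l (c+2) hlen hl (by omega) hg]; exact h2

lemma mem_jlT (board : List (List String))
    (hlen : ∀ row ∈ board, Cb board ≤ row.length) (x : Int × Int) :
    x ∈ jlT board ↔ ∃ l c : Nat, l < Lb board ∧ c < Cb board ∧
      pegP board l c ∧ dirL board (Cb board) l c ∧ x = ((l : Int), (c : Int)) := by
  simp only [jlT, List.mem_flatMap, PySem.List.mem_enumerate_iff, List.mem_map,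
    List.mem_filter, List.mem_range, Bool.and_eq_true, beq_iff_eq]
  constructor
  · rintro ⟨p, ⟨k, hk, rfl⟩, j, ⟨hj, ⟨h0, h1⟩, h2⟩, rfl⟩
    dsimp only at h0 h1 h2
    rw [show (board.headD []).length = Cb board from rfl] at hj
    have hkL : k < Lb board := by rwa [gridT_length] at hk
    have hjC : j + 2 < Cb board := by omega
    rw [gridT_getD board k j hlen hkL (by omega) hk] at h0
    rw [gridT_getD board k (j+1) hlen hkL (by omega) hk] at h1
    rw [gridT_getD board k (j+2) hlen hkL hjC hk] at h2
    refine ⟨k, j + 2, hkL, hjC, ?_, ?_, by simp⟩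
    · simp only [pegP, beq_iff_eq]; exact h2
    · simp only [dirL, Bool.and_eq_true, beq_iff_eq, decide_eq_true_eq]
      refine ⟨⟨by omega, ?_⟩, ?_⟩
      · have e : j + 2 - 1 = j + 1 := by omega
        rw [e]; exact h1
      · have e : j + 2 - 2 = j := by omega
        rw [e]; exact h0
  · rintro ⟨l, c, hl, hc, hpeg, hdir, rfl⟩
    simp only [dirL, Bool.and_eq_true, beq_iff_eq, decide_eq_true_eq] at hdir
    obtain ⟨⟨hb, h1⟩, h2⟩ := hdir
    have hg : l < (gridT board).length := by rw [gridT_length]; exact hl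
    have hc2 : c - 2 + 2 = c := by omega
    have hc1 : c - 2 + 1 = c - 1 := by omega
    refine ⟨(0 + (l : Int), (gridT board)[l]'hg), ⟨l, hg, rfl⟩, c - 2,
      ⟨by rw [show (board.headD []).length = Cb board from rfl]; omega, ⟨?_, ?_⟩, ?_⟩, by simp [hc2]⟩
    · dsimp only; rw [gridT_getD board l (c-2) hlen hl (by omega) hg]; exact h2
    · dsimp only; rw [gridT_getD board l (c-2+1) hlen hl (by omega) hg]
      rw [hc1]; exact h1
    · dsimp only; rw [gridT_getD board l (c-2+2) hlen hl (by omega) hg]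
      rw [hc2]; simpa [pegP] using hpeg

lemma mem_jdT (board : List (List String))
    (hlen : ∀ row ∈ board, Cb board ≤ row.length) (x : Int × Int) :
    x ∈ jdT board ↔ ∃ l c : Nat, l < Lb board ∧ c < Cb board ∧
      pegP board l c ∧ dirD board (Lb board) l c ∧ x = ((l : Int), (c : Int)) := by
  simp only [jdT, List.mem_flatMap, PySem.List.mem_enumerate_iff, List.mem_map,
    List.mem_filter, List.mem_range, Bool.and_eq_true, beq_iff_eq]
  constructor
  · rintro ⟨q, ⟨j, hj, rfl⟩, i, ⟨hi, ⟨h0, h1⟩, h2⟩, rfl⟩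
    dsimp only at h0 h1 h2
    have hjC : j < Cb board := by rwa [colsT_length] at hj
    rw [gridT_length] at hi
    have hiL : i < Lb board := by omega
    rw [colsT_getD board i j hlen hiL hjC hj] at h0
    rw [colsT_getD board (i+1) j hlen (by omega) hjC hj] at h1
    rw [colsT_getD board (i+2) j hlen (by omega) hjC hj] at h2
    refine ⟨i, j, hiL, hjC, ?_, ?_, by simp⟩
    · simp only [pegP, beq_iff_eq]; exact h0
    · simp only [dirD, Bool.and_eq_true, beq_iff_eq, decide_eq_true_eq]
      exact ⟨⟨by omega, h1⟩, h2⟩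
  · rintro ⟨l, c, hl, hc, hpeg, hdir, rfl⟩
    simp only [dirD, Bool.and_eq_true, beq_iff_eq, decide_eq_true_eq] at hdir
    obtain ⟨⟨hb, h1⟩, h2⟩ := hdir
    have hcj : c < (colsT board).length := by rw [colsT_length]; exact hc
    refine ⟨(0 + (c : Int), (colsT board)[c]'hcj), ⟨c, hcj, rfl⟩, l,
      ⟨by rw [gridT_length]; omega, ⟨?_, ?_⟩, ?_⟩, by simp⟩
    · dsimp only; rw [colsT_getD board l c hlen hl hc hcj]
      simpa [pegP] using hpeg
    · dsimp only; rw [colsT_getD board (l+1) c hlen (by omega) hc hcj]; exact h1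
    · dsimp only; rw [colsT_getD board (l+2) c hlen (by omega) hc hcj]; exact h2

lemma mem_juT (board : List (List String))
    (hlen : ∀ row ∈ board, Cb board ≤ row.length) (x : Int × Int) :
    x ∈ juT board ↔ ∃ l c : Nat, l < Lb board ∧ c < Cb board ∧
      pegP board l c ∧ dirU board (Lb board) l c ∧ x = ((l : Int), (c : Int)) := by
  simp only [juT, List.mem_flatMap, PySem.List.mem_enumerate_iff, List.mem_map,
    List.mem_filter, List.mem_range, Bool.and_eq_true, beq_iff_eq]
  constructor
  · rintro ⟨q, ⟨j, hj, rfl⟩, i, ⟨hi, ⟨h0, h1⟩, h2⟩, rfl⟩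
    dsimp only at h0 h1 h2
    have hjC : j < Cb board := by rwa [colsT_length] at hj
    rw [gridT_length] at hi
    have hiL : i + 2 < Lb board := by omega
    rw [colsT_getD board i j hlen (by omega) hjC hj] at h0
    rw [colsT_getD board (i+1) j hlen (by omega) hjC hj] at h1
    rw [colsT_getD board (i+2) j hlen hiL hjC hj] at h2
    refine ⟨i + 2, j, hiL, hjC, ?_, ?_, by simp⟩
    · simp only [pegP, beq_iff_eq]; exact h2
    · simp only [dirU, Bool.and_eq_true, beq_iff_eq, decide_eq_true_eq]
      refine ⟨⟨by omega, ?_⟩, ?_⟩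
      · have e : i + 2 - 1 = i + 1 := by omega
        rw [e]; exact h1
      · have e : i + 2 - 2 = i := by omega
        rw [e]; exact h0
  · rintro ⟨l, c, hl, hc, hpeg, hdir, rfl⟩
    simp only [dirU, Bool.and_eq_true, beq_iff_eq, decide_eq_true_eq] at hdir
    obtain ⟨⟨hb, h1⟩, h2⟩ := hdir
    have hcj : c < (colsT board).length := by rw [colsT_length]; exact hc
    have hl2 : l - 2 + 2 = l := by omega
    have hl1 : l - 2 + 1 = l - 1 := by omega
    refine ⟨(0 + (c : Int), (colsT board)[c]'hcj), ⟨c, hcj, rfl⟩, l - 2,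
      ⟨by rw [gridT_length]; omega, ⟨?_, ?_⟩, ?_⟩, by simp [hl2]⟩
    · dsimp only; rw [colsT_getD board (l-2) c hlen (by omega) hc hcj]; exact h2
    · dsimp only; rw [colsT_getD board (l-2+1) c hlen (by omega) hc hcj]
      rw [hl1]; exact h1
    · dsimp only; rw [colsT_getD board (l-2+2) c hlen (by omega) hc hcj]
      rw [hl2]; simpa [pegP] using hpeg

-- the union of B's four scans contains exactly the movable pegs
lemma M_mem (board : List (List String))
    (hlen : ∀ row ∈ board, Cb board ≤ row.length) (x : Int × Int) :
    x ∈ jrT board ++ jlT board ++ jdT board ++ juT board ↔ x ∈ K board := by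
  simp only [List.mem_append, mem_jrT board hlen, mem_jlT board hlen,
    mem_jdT board hlen, mem_juT board hlen, K_mem, movP, Bool.or_eq_true]
  constructor
  · rintro (((⟨l, c, hl, hc, hp, hd, rfl⟩ | ⟨l, c, hl, hc, hp, hd, rfl⟩) |
        ⟨l, c, hl, hc, hp, hd, rfl⟩) | ⟨l, c, hl, hc, hp, hd, rfl⟩)
    · exact ⟨l, c, hl, hc, hp, by simp [hd], rfl⟩
    · exact ⟨l, c, hl, hc, hp, by simp [hd], rfl⟩
    · exact ⟨l, c, hl, hc, hp, by simp [hd], rfl⟩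
    · exact ⟨l, c, hl, hc, hp, by simp [hd], rfl⟩
  · rintro ⟨l, c, hl, hc, hp, hmov, rfl⟩
    rcases hmov with ((hd | hd) | hd) | hd
    · exact .inl (.inl (.inr ⟨l, c, hl, hc, hp, hd, rfl⟩))
    · exact .inr ⟨l, c, hl, hc, hp, hd, rfl⟩
    · exact .inl (.inl (.inl ⟨l, c, hl, hc, hp, hd, rfl⟩))
    · exact .inl (.inr ⟨l, c, hl, hc, hp, hd, rfl⟩)

-- pointwise sums over a common index list
lemma sum_map_add_nat (xs : List Nat) (f g : Nat → Nat) :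
    (xs.map (fun x => f x + g x)).sum = (xs.map f).sum + (xs.map g).sum := by
  induction xs with
  | nil => simp
  | cons x xs ih => simp [ih]; omega

theorem non_movable_pegs_spec : Claim_equal_non_movable_pegs := by
  intro board _ hpre
  obtain ⟨hne, hlen⟩ := hpre
  show non_movable_pegs board = non_movable_pegs_alt board
  rw [A_eq board, alt_eq board, pegs_eq board hlen]
  have hsetK : (PySem.Set.ofList (jrT board ++ jlT board ++ jdT board ++ juT board)).length
      = (K board).length := by
    refine List.Perm.length_eq ?_
    refine (List.perm_ext_iff_of_nodup (PySem.Set.nodup_ofList _) (K_nodup board)).mpr ?_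
    intro a
    rw [PySem.Set.mem_ofList]
    exact M_mem board hlen a
  rw [hsetK, K_length board]
  have hsplit : ((List.range (Lb board)).map (fun l =>
      ((List.range (Cb board)).filter (fun c => pegP board l c)).length)).sum
    = ((List.range (Lb board)).map (fun l =>
        ((List.range (Cb board)).filter (fun c =>
          pegP board l c && movP board (Lb board) (Cb board) l c)).length)).sum
      + ((List.range (Lb board)).map (fun l =>
        ((List.range (Cb board)).filter (fun c =>
          pegP board l c && !movP board (Lb board) (Cb board) l c)).length)).sum := by
    rw [← sum_map_add_nat]
    refine congrArg List.sum (List.map_congr_left ?_)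
    intro l _
    exact filter_split (List.range (Cb board)) (fun c => pegP board l c)
      (fun c => movP board (Lb board) (Cb board) l c)
  rw [hsplit]
  push_cast
  ring
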